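-- pv_equiv track=rewrite | github.com/Crazy0neBoy/YoloForge-Classify | data_preparation.py | compute_target_counts_from_split_map
-- ===== SOURCE A (Python) =====
-- def compute_target_counts_from_split_map(split_map, classes):
--     counts = {s: {cls:0 for cls in classes} for s in ("train", "valid", "test")}
--     for key, split in split_map.items():
--         if "/" in key:
--             cls, _ = key.split("/", 1)
--             if cls in classes and split in counts:
--                 counts[split][cls] += 1
--     return counts
-- ===== SOURCE B (Python) =====
-- from collections import Counter
--
-- def _split_counts(split_map, classes, split):
--     c = Counter(key.split("/", 1)[0]
--                 for key, s in split_map.items()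
--                 if "/" in key and s == split)
--     return {cls: c.get(cls, 0) for cls in classes}
--
-- def compute_target_counts_from_split_map(split_map, classes):
--     return {split: _split_counts(split_map, classes, split)
--             for split in ("train", "valid", "test")}
-- ===== Notes on version B (the rewrite author's own statement) =====
-- stated objective: alternative
-- what changed: A makes one pass over the dict dispatching each entry into a pre-initialized per-split nested dict of zeros; B instead builds, for each of the three splits, a Counter over that split's class prefixes and reads it back through the classes list.
import Mathlib
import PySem

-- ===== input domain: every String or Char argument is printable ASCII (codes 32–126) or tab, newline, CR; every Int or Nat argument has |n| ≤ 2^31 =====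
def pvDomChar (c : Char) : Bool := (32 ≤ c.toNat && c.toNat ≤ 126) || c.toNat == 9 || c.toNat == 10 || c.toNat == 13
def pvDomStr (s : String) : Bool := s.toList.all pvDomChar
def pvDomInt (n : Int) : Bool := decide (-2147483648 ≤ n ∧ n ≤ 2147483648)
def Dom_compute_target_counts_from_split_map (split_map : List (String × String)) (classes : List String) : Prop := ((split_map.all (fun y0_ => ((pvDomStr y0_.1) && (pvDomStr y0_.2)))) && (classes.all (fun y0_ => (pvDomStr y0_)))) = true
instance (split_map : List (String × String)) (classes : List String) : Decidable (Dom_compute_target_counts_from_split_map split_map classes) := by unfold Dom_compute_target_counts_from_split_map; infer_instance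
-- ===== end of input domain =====

-- B replaces A's single dispatch-on-split pass over the dict with, per split, a Counter over
-- that split's class prefixes read back through `classes` (objective: alternative decomposition).
-- Both ports read the dict argument through PySem.Dict.ofList, which is exactly Python's dict
-- construction from the association list (duplicate keys: last value wins, first position kept).

-- shared helper: key.split("/", 1)[0] (both Pythons compute exactly this expression)
def pvPrefix (key : String) : String :=
  ((PySem.Str.splitMax? key "/" 1).getD []).getD 0 ""

-- ===== PORT A =====
-- counts = {s: {cls: 0 for cls in classes} for s in ("train","valid","test")}
def pvInitCounts (classes : List String) : PySem.Dict String Int :=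
  classes.foldl (fun d cls => d.insert cls 0) PySem.Dict.empty

-- one iteration of A's loop body; `counts[split][cls] += 1` only fires when
-- `cls in classes and split in counts`, so the modify defaults are never used
def pvAStep (classes : List String)
    (counts : PySem.Dict String (PySem.Dict String Int)) (kv : String × String) :
    PySem.Dict String (PySem.Dict String Int) :=
  if PySem.Str.isIn "/" kv.1 then
    let cls := pvPrefix kv.1
    if classes.contains cls && counts.contains kv.2 then
      counts.modify kv.2 PySem.Dict.empty (fun inner => inner.modify cls 0 (· + 1))
    else counts
  else counts

def compute_target_counts_from_split_map (split_map : List (String × String))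
    (classes : List String) : List (String × List (String × Int)) :=
  let items := (PySem.Dict.ofList split_map).items
  let counts := (["train", "valid", "test"] : List String).foldl
      (fun d s => d.insert s (pvInitCounts classes)) PySem.Dict.empty
  let final := items.foldl (pvAStep classes) counts
  final.items.map (fun p => (p.1, p.2.items))

-- ===== PORT B =====
-- _split_counts: Counter over the class prefixes of this split's keys, read back through classes
def pvSplitCounts (items : List (String × String)) (classes : List String) (split : String) :
    PySem.Dict String Int :=
  let c := PySem.Dict.counter
      ((items.filter (fun kv => PySem.Str.isIn "/" kv.1 && kv.2 == split)).map
        (fun kv => pvPrefix kv.1))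
  classes.foldl (fun d cls => d.insert cls (c.getD cls 0)) PySem.Dict.empty

def compute_target_counts_from_split_map_alt (split_map : List (String × String))
    (classes : List String) : List (String × List (String × Int)) :=
  let items := (PySem.Dict.ofList split_map).items
  (["train", "valid", "test"] : List String).map
    (fun split => (split, (pvSplitCounts items classes split).items))

-- ===== PRECONDITION & SPEC =====
def Spec_compute_target_counts_from_split_map (split_map : List (String × String)) (classes : List String) (out : List (String × List (String × Int))) : Prop := out = compute_target_counts_from_split_map_alt split_map classes
instance (split_map : List (String × String)) (classes : List String) (out : List (String × List (String × Int))) : Decidable (Spec_compute_target_counts_from_split_map split_map classes out) := by unfold Spec_compute_target_counts_from_split_map; infer_instance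

-- ===== CLAIM (what is proved, stated in full; the proofs are below) =====
def Claim_equal_compute_target_counts_from_split_map : Prop := ∀ (split_map : List (String × String)) (classes : List String), Dom_compute_target_counts_from_split_map split_map classes → Spec_compute_target_counts_from_split_map split_map classes (compute_target_counts_from_split_map split_map classes)

-- ===== LEMMAS AND PROOFS =====

-- getD after a fold of inserts whose value depends only on the key
theorem getD_foldl_insert_fun {κ ν : Type} [BEq κ] [LawfulBEq κ] [DecidableEq κ]
    (l : List κ) (v : κ → ν) (d : PySem.Dict κ ν) (x : κ) (d0 : ν) :
    (l.foldl (fun d k => d.insert k (v k)) d).getD x d0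
      = if x ∈ l then v x else d.getD x d0 := by
  induction l generalizing d with
  | nil => simp
  | cons a l ih =>
    simp only [List.foldl_cons, ih, PySem.Dict.getD_insert, List.mem_cons]
    by_cases hl : x ∈ l <;> by_cases ha : x = a <;> simp [hl, ha]

-- one step of A's loop neither adds nor removes outer keys
theorem pvAStep_keys (classes : List String)
    (c : PySem.Dict String (PySem.Dict String Int)) (kv : String × String) :
    (pvAStep classes c kv).keys = c.keys := by
  simp only [pvAStep]
  split_ifs with h1 h2
  · have hc : c.contains kv.2 = true :=
      (Bool.and_eq_true _ _ |>.mp h2).2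
    rw [PySem.Dict.keys_modify, PySem.Dict.keys_insert_of_contains _ _ hc]
  · rfl
  · rfl

theorem foldl_pvAStep_keys (classes : List String) (l : List (String × String))
    (c : PySem.Dict String (PySem.Dict String Int)) :
    (l.foldl (pvAStep classes) c).keys = c.keys := by
  induction l generalizing c with
  | nil => rfl
  | cons kv l ih => rw [List.foldl_cons, ih, pvAStep_keys]

-- A's predicate for the entries counted into split s
def pvPredA (classes : List String) (s : String) (kv : String × String) : Bool :=
  PySem.Str.isIn "/" kv.1 && classes.contains (pvPrefix kv.1) && kv.2 == s

-- the outer fold of A, observed at one split key, is the inner counting fold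
-- over exactly the entries of that split whose class prefix is known
theorem foldl_pvAStep_getD (classes : List String) (s : String)
    (l : List (String × String)) (c : PySem.Dict String (PySem.Dict String Int))
    (hc : c.contains s = true) :
    (l.foldl (pvAStep classes) c).getD s PySem.Dict.empty
      = ((l.filter (pvPredA classes s)).map (fun kv => pvPrefix kv.1)).foldl
          (fun d x => d.modify x 0 (· + 1)) (c.getD s PySem.Dict.empty) := by
  induction l generalizing c with
  | nil => simp
  | cons kv l ih =>
    rw [List.foldl_cons, List.filter_cons]
    by_cases h1 : PySem.Str.isIn "/" kv.1
    · by_cases h2 : classes.contains (pvPrefix kv.1)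
      · by_cases h3 : kv.2 = s
        · -- counted entry: the guard fires and the inner dict at s is modified
          have hg : (classes.contains (pvPrefix kv.1) && c.contains kv.2) = true := by
            rw [h2, h3, hc]; rfl
          have hstep : pvAStep classes c kv
              = c.modify kv.2 PySem.Dict.empty
                  (fun inner => inner.modify (pvPrefix kv.1) 0 (· + 1)) := by
            simp only [pvAStep]; rw [if_pos h1, if_pos hg]
          have hp : pvPredA classes s kv = true := by
            unfold pvPredA; rw [h1, h2, h3]; simp
          rw [hstep, ih _ (by rw [PySem.Dict.contains_modify]; simp [hc]), hp]
          subst h3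
          rw [PySem.Dict.getD_modify_self]
          simp
        · -- other split (or an unknown split): the inner dict at s is untouched
          have hp : pvPredA classes s kv = false := by
            unfold pvPredA
            rw [beq_eq_false_iff_ne.mpr h3, Bool.and_false]
          rw [hp]
          by_cases hg : (classes.contains (pvPrefix kv.1) && c.contains kv.2) = true
          · have hstep : pvAStep classes c kv
                = c.modify kv.2 PySem.Dict.empty
                    (fun inner => inner.modify (pvPrefix kv.1) 0 (· + 1)) := by
              simp only [pvAStep]; rw [if_pos h1, if_pos hg]
            have hne : kv.2 ≠ s := h3
            rw [hstep, ih _ (by rw [PySem.Dict.contains_modify]; simp [hc]),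
              PySem.Dict.getD_modify_of_ne _ _ _ (Ne.symm hne)]
            simp
          · have hstep : pvAStep classes c kv = c := by
              simp only [pvAStep]; rw [if_pos h1, if_neg hg]
            rw [hstep, ih _ hc]
            simp
      · -- prefix not a known class: skipped on both sides
        have h2' : classes.contains (pvPrefix kv.1) = false := Bool.eq_false_iff.mpr h2
        have hp : pvPredA classes s kv = false := by
          unfold pvPredA; rw [h2', Bool.and_false, Bool.false_and]
        have hstep : pvAStep classes c kv = c := by
          simp only [pvAStep]
          rw [if_pos h1, if_neg (by rw [h2', Bool.false_and]; simp)]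
        rw [hp, hstep, ih _ hc]
        simp
    · -- no '/' in the key: skipped on both sides
      have hp : pvPredA classes s kv = false := by
        unfold pvPredA
        rw [Bool.eq_false_iff.mpr h1, Bool.false_and, Bool.false_and]
      have hstep : pvAStep classes c kv = c := by
        simp only [pvAStep]; rw [if_neg h1]
      rw [hp, hstep, ih _ hc]
      simp
-- A's counted entries for split s are B's counted entries for s restricted to known classes
theorem filtered_prefixes_eq (items : List (String × String)) (classes : List String)
    (s : String) :
    (items.filter (pvPredA classes s)).map (fun kv => pvPrefix kv.1)
      = ((items.filter (fun kv => PySem.Str.isIn "/" kv.1 && kv.2 == s)).map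
          (fun kv => pvPrefix kv.1)).filter (fun y => classes.contains y) := by
  rw [List.filter_map, List.filter_filter]
  have h : ∀ kv ∈ items, pvPredA classes s kv
      = (((fun y => classes.contains y) ∘ fun kv => pvPrefix kv.1) kv
          && (PySem.Str.isIn "/" kv.1 && kv.2 == s)) := by
    intro kv _
    unfold pvPredA
    simp only [Function.comp]
    cases PySem.Str.isIn "/" kv.1 <;> cases classes.contains (pvPrefix kv.1) <;>
      cases kv.2 == s <;> rfl
  rw [List.filter_congr h]

-- A's inner counting fold over split s equals B's per-split dict, as items lists
theorem inner_items (items : List (String × String)) (classes : List String) (s : String) :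
    (((items.filter (pvPredA classes s)).map (fun kv => pvPrefix kv.1)).foldl
        (fun d x => d.modify x 0 (· + 1)) (pvInitCounts classes)).items
      = (pvSplitCounts items classes s).items := by
  have hkeysInit : (pvInitCounts classes).keys = PySem.Set.ofList classes := by
    unfold pvInitCounts
    rw [PySem.Dict.keys_foldl_insert classes (fun _ _ => 0), PySem.Dict.keys_empty,
      PySem.Set.update_nil_left]
  have hsub : ∀ y ∈ (items.filter (pvPredA classes s)).map (fun kv => pvPrefix kv.1),
      y ∈ classes := by
    intro y hy
    rcases List.mem_map.mp hy with ⟨kv, hkv, rfl⟩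
    have := (List.mem_filter.mp hkv).2
    unfold pvPredA at this
    exact List.contains_iff_mem.mp
      ((Bool.and_eq_true _ _ |>.mp (Bool.and_eq_true _ _ |>.mp this).1).2)
  have hkeysA : (((items.filter (pvPredA classes s)).map (fun kv => pvPrefix kv.1)).foldl
      (fun d x => d.modify x 0 (· + 1)) (pvInitCounts classes)).keys
        = PySem.Set.ofList classes := by
    rw [PySem.Dict.keys_foldl_modify _ 0 (fun _ _ => (· + 1)), hkeysInit,
      PySem.Set.update_eq_append_filter]
    have hnil : ((PySem.Set.ofList ((items.filter (pvPredA classes s)).map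
        (fun kv => pvPrefix kv.1))).filter
          (fun y => !(PySem.Set.ofList classes).contains y)) = [] := by
      rw [List.filter_eq_nil_iff]
      intro y hy
      have hm : y ∈ classes := hsub y ((PySem.Set.mem_ofList _ _).mp hy)
      simpa using hm
    rw [hnil, List.append_nil]
  have hkeysB : (pvSplitCounts items classes s).keys = PySem.Set.ofList classes := by
    unfold pvSplitCounts
    rw [PySem.Dict.keys_foldl_insert, PySem.Dict.keys_empty, PySem.Set.update_nil_left]
  rw [PySem.Dict.items_eq_map_keys _ (by rw [hkeysA]; exact PySem.Set.nodup_ofList _) 0,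
    PySem.Dict.items_eq_map_keys _ (by rw [hkeysB]; exact PySem.Set.nodup_ofList _) 0,
    hkeysA, hkeysB]
  apply List.map_congr_left
  intro k hk
  have hkc : k ∈ classes := (PySem.Set.mem_ofList _ _).mp hk
  have h1 : (((items.filter (pvPredA classes s)).map (fun kv => pvPrefix kv.1)).foldl
      (fun d x => d.modify x 0 (· + 1)) (pvInitCounts classes)).getD k 0
        = ((items.filter (pvPredA classes s)).map (fun kv => pvPrefix kv.1)).count k := by
    rw [PySem.Dict.getD_foldl_modify_add_one]
    unfold pvInitCounts
    rw [getD_foldl_insert_fun classes (fun _ => 0), if_pos hkc]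
    simp
  have h2 : (pvSplitCounts items classes s).getD k 0
      = ((items.filter (fun kv => PySem.Str.isIn "/" kv.1 && kv.2 == s)).map
          (fun kv => pvPrefix kv.1)).count k := by
    unfold pvSplitCounts
    rw [getD_foldl_insert_fun classes
      (fun cls => (PySem.Dict.counter ((items.filter
        (fun kv => PySem.Str.isIn "/" kv.1 && kv.2 == s)).map
          (fun kv => pvPrefix kv.1))).getD cls 0), if_pos hkc, PySem.Dict.getD_counter]
  rw [h1, h2, filtered_prefixes_eq, List.count_filter (List.contains_iff_mem.mpr hkc)]

-- ===== VERDICT (by name: the statement is the Claim_ definition above) =====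
theorem compute_target_counts_from_split_map_spec : Claim_equal_compute_target_counts_from_split_map := by
  intro split_map classes _
  unfold Spec_compute_target_counts_from_split_map
  simp only [compute_target_counts_from_split_map, compute_target_counts_from_split_map_alt]
  have hkeys0 : ((["train", "valid", "test"] : List String).foldl
      (fun d s => d.insert s (pvInitCounts classes)) PySem.Dict.empty).keys
        = ["train", "valid", "test"] := by
    rw [PySem.Dict.keys_foldl_insert _ (fun _ _ => pvInitCounts classes),
      PySem.Dict.keys_empty, PySem.Set.update_nil_left]
    decide
  have hkeysF : (((PySem.Dict.ofList split_map).items).foldl (pvAStep classes)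
      ((["train", "valid", "test"] : List String).foldl
        (fun d s => d.insert s (pvInitCounts classes)) PySem.Dict.empty)).keys
        = ["train", "valid", "test"] := by
    rw [foldl_pvAStep_keys, hkeys0]
  rw [PySem.Dict.items_eq_map_keys _ (by rw [hkeysF]; decide) PySem.Dict.empty, hkeysF,
    List.map_map]
  apply List.map_congr_left
  intro s hs
  have hc0 : ((["train", "valid", "test"] : List String).foldl
      (fun d s => d.insert s (pvInitCounts classes)) PySem.Dict.empty).contains s = true :=
    (PySem.Dict.contains_iff_mem_keys _ _).mpr (by rw [hkeys0]; exact hs)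
  simp only [Function.comp]
  rw [foldl_pvAStep_getD classes s _ _ hc0,
    getD_foldl_insert_fun _ (fun _ => pvInitCounts classes), if_pos hs, inner_items]
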